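-- pv_equiv track=rewrite | github.com/RKuipers/Advent-of-code | 2024/day7.py | checkA
-- ===== SOURCE A (Python) =====
-- def checkA(final, vals, partial):
--     if len(vals) == 0:
--         return final == partial
--     if partial > final:
--         return False
--     return checkA(final, vals[1:], vals[0] + partial) or checkA(
--         final, vals[1:], vals[0] * partial
--     )
-- ===== SOURCE B (Python) =====
-- def checkA(final, vals, partial):
--     # Iterative breadth-first sweep: keep the list of reachable partial values,
--     # pruning (as A does) any partial exceeding final before it is extended.
--     level = [partial]
--     for v in vals:
--         level = [w for p in level if p <= final for w in (v + p, v * p)]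
--     return final in level
-- ===== Notes on version B (the rewrite author's own statement) =====
-- stated objective: alternative
-- what changed: Replaces the pruned depth-first recursion with an iterative breadth-first loop that maintains the list of reachable partial values level by level and checks membership of final at the end.
import Mathlib
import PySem

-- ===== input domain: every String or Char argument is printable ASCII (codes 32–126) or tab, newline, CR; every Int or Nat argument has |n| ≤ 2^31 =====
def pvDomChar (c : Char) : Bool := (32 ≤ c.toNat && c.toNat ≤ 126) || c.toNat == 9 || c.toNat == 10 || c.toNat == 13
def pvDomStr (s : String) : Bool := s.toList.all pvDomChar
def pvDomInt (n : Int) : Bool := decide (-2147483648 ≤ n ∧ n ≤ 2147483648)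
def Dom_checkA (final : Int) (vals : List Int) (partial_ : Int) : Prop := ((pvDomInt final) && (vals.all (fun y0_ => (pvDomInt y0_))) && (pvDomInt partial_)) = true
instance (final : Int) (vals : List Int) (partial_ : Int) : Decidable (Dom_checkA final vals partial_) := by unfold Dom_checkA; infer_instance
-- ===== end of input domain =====

-- B replaces A's pruned depth-first recursion with an iterative breadth-first level
-- sweep over the list of reachable partial values (alternative decomposition, same cost).
-- ===== PORT A =====
def checkA (final : Int) (vals : List Int) (partial_ : Int) : Bool :=
  match vals with
  | [] => final == partial_
  | v :: rest =>
    if partial_ > final then false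
    else checkA final rest (v + partial_) || checkA final rest (v * partial_)

-- ===== PORT B =====
def checkAStep (final : Int) (level : List Int) (v : Int) : List Int :=
  (level.filter (fun p => p ≤ final)).flatMap (fun p => [v + p, v * p])

def checkA_alt (final : Int) (vals : List Int) (partial_ : Int) : Bool :=
  (vals.foldl (checkAStep final) [partial_]).contains final

-- ===== PRECONDITION & SPEC =====
def Spec_checkA (final : Int) (vals : List Int) (partial_ : Int) (out : Bool) : Prop := out = checkA_alt final vals partial_
instance (final : Int) (vals : List Int) (partial_ : Int) (out : Bool) : Decidable (Spec_checkA final vals partial_ out) := by unfold Spec_checkA; infer_instance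

-- ===== CLAIM (what is proved, stated in full; the proofs are below) =====
def Claim_equal_checkA : Prop := ∀ (final : Int) (vals : List Int) (partial_ : Int), Dom_checkA final vals partial_ → Spec_checkA final vals partial_ (checkA final vals partial_)

-- ===== LEMMAS AND PROOFS =====

-- ===== VERDICT (by name: the statement is the Claim_ definition above) =====
theorem foldl_step_contains (final : Int) (vals : List Int) (level : List Int) :
    (vals.foldl (checkAStep final) level).contains final
      = level.any (fun p => checkA final vals p) := by
  induction vals generalizing level with
  | nil =>
    simp only [List.foldl_nil, checkA, List.contains_eq_any_beq]
  | cons v rest ih =>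
    simp only [List.foldl_cons, ih, checkAStep, List.any_flatMap, List.any_filter]
    congr 1
    funext p
    simp only [checkA, List.any_cons, List.any_nil, Bool.or_false]
    by_cases h : p > final
    · simp [h, show ¬ (p ≤ final) by omega]
    · simp [h, show p ≤ final by omega]

theorem checkA_spec : Claim_equal_checkA := by
  intro final vals partial_ _
  unfold Spec_checkA checkA_alt
  rw [foldl_step_contains]
  simp
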